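-- pv_equiv track=rewrite | github.com/shanmukatonangi/DSA_PY | Sliding-Window/maxsubarrayku.py | max_sum_k_unique
-- ===== SOURCE A (Python) =====
-- def max_sum_k_unique(nums,k):
--     maxsum=0
--     n=len(nums)
--
--     for i in range(n-k+1):
--         subarray=nums[i:i+k]
--
--
--         if len(set(subarray)) == k:
--             currentsum=sum(subarray)
--             maxsum=max(maxsum,currentsum)
--
--     return maxsum
-- ===== SOURCE B (Python) =====
-- def max_sum_k_unique(nums, k):
--     # O(n) sliding window: running sum + frequency dict with a distinct counter.
--     if k <= 0:
--         return 0
--     maxsum = 0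
--     cursum = 0
--     counts = {}
--     distinct = 0
--     for r, x in enumerate(nums):
--         cursum += x
--         counts[x] = counts.get(x, 0) + 1
--         if counts[x] == 1:
--             distinct += 1
--         if r >= k:
--             y = nums[r - k]
--             cursum -= y
--             counts[y] -= 1
--             if counts[y] == 0:
--                 distinct -= 1
--         if r >= k - 1 and distinct == k:
--             maxsum = max(maxsum, cursum)
--     return maxsum
-- ===== Notes on version B (the rewrite author's own statement) =====
-- stated objective: faster
-- what changed: A rescans every window (slice + set + sum, O(k) work per start); B makes one pass with a sliding window keeping a running sum, a frequency dict and a distinct counter.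
import Mathlib
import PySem

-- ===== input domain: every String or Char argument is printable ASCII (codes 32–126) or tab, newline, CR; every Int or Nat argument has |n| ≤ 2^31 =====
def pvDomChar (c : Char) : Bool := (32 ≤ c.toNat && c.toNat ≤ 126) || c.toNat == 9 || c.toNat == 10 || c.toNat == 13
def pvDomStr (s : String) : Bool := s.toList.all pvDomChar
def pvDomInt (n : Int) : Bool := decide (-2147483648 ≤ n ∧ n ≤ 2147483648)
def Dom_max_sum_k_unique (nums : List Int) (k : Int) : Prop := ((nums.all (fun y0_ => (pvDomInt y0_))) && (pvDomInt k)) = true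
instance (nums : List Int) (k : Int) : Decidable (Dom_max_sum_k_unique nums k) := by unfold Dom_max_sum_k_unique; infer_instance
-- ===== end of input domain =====

-- B replaces A's O(n*k) per-window slice/set/sum rescan with an O(n) sliding window
-- (running sum + frequency dict + distinct counter); return values are identical.

-- ===== PORT A =====
def max_sum_k_unique (nums : List Int) (k : Int) : Int :=
  let n : Int := nums.length
  (PySem.List.pyRange 0 (n - k + 1) 1).foldl
    (fun maxsum i =>
      let subarray := PySem.List.slice nums (some i) (some (i + k))
      if ((PySem.Set.ofList subarray).length : Int) = k then
        max maxsum subarray.sum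
      else maxsum) 0

-- ===== PORT B =====
-- one iteration of B's for-loop; state = (maxsum, cursum, counts, distinct), p = (r, x)
def bStep (nums : List Int) (k : Int)
    (st : Int × Int × PySem.Dict Int Int × Int) (p : Int × Int) :
    Int × Int × PySem.Dict Int Int × Int :=
  let r := p.1
  let x := p.2
  let cursum1 := st.2.1 + x
  let counts1 := st.2.2.1.insert x (st.2.2.1.getD x 0 + 1)
  let distinct1 := if counts1.getD x 0 = 1 then st.2.2.2 + 1 else st.2.2.2
  -- the 'if r >= k' block: nums[r-k] is read only when k ≤ r, and is then in range
  let y := PySem.List.pyGetD nums (r - k) 0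
  let cursum2 := if k ≤ r then cursum1 - y else cursum1
  let counts2 := if k ≤ r then counts1.insert y (counts1.getD y 0 - 1) else counts1
  let distinct2 := if k ≤ r then
      (if counts2.getD y 0 = 0 then distinct1 - 1 else distinct1)
    else distinct1
  let maxsum2 := if k - 1 ≤ r ∧ distinct2 = k then max st.1 cursum2 else st.1
  (maxsum2, cursum2, counts2, distinct2)

def max_sum_k_unique_alt (nums : List Int) (k : Int) : Int :=
  if k ≤ 0 then 0
  else ((PySem.List.enumerate nums 0).foldl (bStep nums k) (0, 0, PySem.Dict.empty, 0)).1

-- ===== PRECONDITION & SPEC =====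
def Spec_max_sum_k_unique (nums : List Int) (k : Int) (out : Int) : Prop := out = max_sum_k_unique_alt nums k
instance (nums : List Int) (k : Int) (out : Int) : Decidable (Spec_max_sum_k_unique nums k out) := by unfold Spec_max_sum_k_unique; infer_instance

-- ===== CLAIM (what is proved, stated in full; the proofs are below) =====
def Claim_equal_max_sum_k_unique : Prop := ∀ (nums : List Int) (k : Int), Dom_max_sum_k_unique nums k → Spec_max_sum_k_unique nums k (max_sum_k_unique nums k)

-- ===== LEMMAS AND PROOFS =====

def winX (nums : List Int) (kn t : Nat) : List Int := (nums.take t).drop (t - kn)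
def aStepX (k : Int) (m : Int) (sub : List Int) : Int :=
  if ((PySem.Set.ofList sub).length : Int) = k then max m sub.sum else m
def aAccX (nums : List Int) (k : Int) (kn t : Nat) : Int :=
  (List.range (t + 1 - kn)).foldl (fun m i => aStepX k m (winX nums kn (i + kn))) 0
def BInv (nums : List Int) (k : Int) (kn t : Nat)
    (st : Int × Int × PySem.Dict Int Int × Int) : Prop :=
  st.1 = aAccX nums k kn t ∧
  st.2.1 = (winX nums kn t).sum ∧
  (∀ v, st.2.2.1.getD v 0 = ((winX nums kn t).count v : Int)) ∧
  st.2.2.2 = ((winX nums kn t).toFinset.card : Int)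

theorem ofList_length_eq_card (l : List Int) :
    (PySem.Set.ofList l).length = l.toFinset.card := by
  have hnd := PySem.Set.nodup_ofList (α := Int) l
  rw [← List.toFinset_card_of_nodup hnd]
  congr 1
  ext x
  simp [PySem.Set.mem_ofList]
theorem card_append_singleton (l : List Int) (x : Int) :
    (l ++ [x]).toFinset.card = l.toFinset.card + (if x ∈ l then 0 else 1) := by
  rw [List.toFinset_append]
  by_cases h : x ∈ l
  · simp [h, Finset.insert_eq_self.2 (List.mem_toFinset.2 h)]
  · simp only [List.toFinset_cons, List.toFinset_nil, insert_empty_eq]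
    rw [Finset.union_comm, ← Finset.insert_eq, Finset.card_insert_of_notMem (by simp [h])]
    simp [h]
theorem card_cons (l : List Int) (y : Int) :
    (y :: l).toFinset.card = l.toFinset.card + (if y ∈ l then 0 else 1) := by
  by_cases h : y ∈ l
  · simp [h, Finset.insert_eq_self.2 (List.mem_toFinset.2 h)]
  · simp only [List.toFinset_cons]
    rw [Finset.card_insert_of_notMem (by simp [h])]
    simp [h]

theorem aAcc_succ_of_le (nums : List Int) (k : Int) (kn t : Nat) (hle : kn ≤ t + 1) :
    aAccX nums k kn (t + 1) = aStepX k (aAccX nums k kn t) (winX nums kn (t + 1)) := by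
  unfold aAccX
  rw [show t + 1 + 1 - kn = (t + 1 - kn) + 1 from by omega, List.range_succ, List.foldl_append]
  simp [show t + 1 - kn + kn = t + 1 from by omega]

theorem aAcc_succ_of_lt (nums : List Int) (k : Int) (kn t : Nat) (hlt : t + 1 < kn) :
    aAccX nums k kn (t + 1) = aAccX nums k kn t := by
  unfold aAccX
  rw [show t + 1 + 1 - kn = 0 from by omega, show t + 1 - kn = 0 from by omega]

theorem maxsum_update (nums : List Int) (kn t : Nat) (hkn : 1 ≤ kn)
    (M c2 d2 : Int)
    (hM : M = aAccX nums (kn : Int) kn t)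
    (hc2 : c2 = (winX nums kn (t + 1)).sum)
    (hd2 : d2 = ((winX nums kn (t + 1)).toFinset.card : Int)) :
    (if (kn : Int) - 1 ≤ (t : Int) ∧ d2 = (kn : Int) then max M c2 else M)
      = aAccX nums (kn : Int) kn (t + 1) := by
  by_cases hle : kn ≤ t + 1
  · rw [aAcc_succ_of_le nums _ kn t hle]
    have hcond1 : (kn : Int) - 1 ≤ (t : Int) := by omega
    unfold aStepX
    rw [ofList_length_eq_card]
    by_cases hcc : (((winX nums kn (t + 1)).toFinset.card : Nat) : Int) = (kn : Int)
    · rw [if_pos ⟨hcond1, by rw [hd2]; exact hcc⟩, if_pos hcc, hM, hc2]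
    · rw [if_neg (by rw [hd2]; tauto), if_neg hcc, hM]
  · rw [aAcc_succ_of_lt nums _ kn t (by omega)]
    rw [if_neg (by intro hc; exact absurd hc.1 (by omega)), hM]

theorem inv_stepX (nums : List Int) (k : Int) (kn t : Nat) (hk : k = (kn : Int)) (hkn : 1 ≤ kn)
    (ht : t < nums.length) (st : Int × Int × PySem.Dict Int Int × Int)
    (h : BInv nums k kn t st) :
    BInv nums k kn (t + 1) (bStep nums k st ((t : Int), nums[t])) := by
  subst hk
  obtain ⟨M, C, Dd, d⟩ := st
  obtain ⟨hM, hC, hD, hd⟩ := h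
  simp only at hM hC hD hd
  have hD1 : ∀ v, (Dd.insert nums[t] (Dd.getD nums[t] 0 + 1)).getD v 0
      = (((winX nums kn t ++ [nums[t]]).count v : Nat) : Int) := by
    intro v
    rw [PySem.Dict.getD_insert]
    by_cases hv : v = nums[t]
    · subst hv
      rw [if_pos rfl, hD _]
      simp [List.count_append]
    · rw [if_neg hv, hD v]
      have : (nums[t] : Int) ≠ v := fun hh => hv hh.symm
      simp [List.count_append, this]
  have hd1 : (if (Dd.insert nums[t] (Dd.getD nums[t] 0 + 1)).getD nums[t] 0 = 1 then d + 1 else d)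
      = (((winX nums kn t ++ [nums[t]]).toFinset.card : Nat) : Int) := by
    rw [hD1 nums[t], card_append_singleton]
    by_cases hxm : nums[t] ∈ winX nums kn t
    · have hcnt : 0 < (winX nums kn t).count nums[t] := List.count_pos_iff.2 hxm
      rw [if_neg (by push_cast; simp [List.count_append]; omega), hd, if_pos hxm]
      push_cast; ring
    · have hcnt : (winX nums kn t).count nums[t] = 0 := List.count_eq_zero.2 hxm
      rw [if_pos (by simp [List.count_append, hcnt]), hd, if_neg hxm]
      push_cast; ring
  by_cases hcase : kn ≤ t
  · -- removal case
    have hkr : ((kn : Int)) ≤ (t : Int) := by omega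
    have hy : PySem.List.pyGetD nums ((t : Int) - (kn : Int)) 0 = nums[t - kn] := by
      rw [show (t : Int) - (kn : Int) = ((t - kn : Nat) : Int) from by omega,
        PySem.List.pyGetD_natCast]
      exact List.getD_eq_getElem nums 0 (by omega)
    have hWcons : winX nums kn t = nums[t - kn] :: (nums.take t).drop (t - kn + 1) := by
      unfold winX
      rw [List.drop_eq_getElem_cons (by simp [List.length_take]; omega)]
      congr 1
      rw [List.getElem_take]
    have hW' : winX nums kn (t + 1) = (nums.take t).drop (t - kn + 1) ++ [nums[t]] := by
      unfold winX
      rw [List.take_add_one, List.getElem?_eq_getElem ht]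
      simp only [Option.toList_some]
      rw [show t + 1 - kn = t - kn + 1 from by omega, List.drop_append]
      congr 1
      rw [show t - kn + 1 - (nums.take t).length = 0 from by simp [List.length_take]; omega]
      rfl
    have hu : winX nums kn t ++ [nums[t]] = nums[t - kn] :: winX nums kn (t + 1) := by
      rw [hWcons, hW']
      rfl
    have hbs : bStep nums (kn : Int) (M, C, Dd, d) ((t : Int), nums[t]) =
        (if (kn : Int) - 1 ≤ (t : Int) ∧
            (if ((Dd.insert nums[t] (Dd.getD nums[t] 0 + 1)).insert nums[t - kn]
                  ((Dd.insert nums[t] (Dd.getD nums[t] 0 + 1)).getD nums[t - kn] 0 - 1)).getD nums[t - kn] 0 = 0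
              then (if (Dd.insert nums[t] (Dd.getD nums[t] 0 + 1)).getD nums[t] 0 = 1 then d + 1 else d) - 1
              else (if (Dd.insert nums[t] (Dd.getD nums[t] 0 + 1)).getD nums[t] 0 = 1 then d + 1 else d)) = (kn : Int)
          then max M (C + nums[t] - nums[t - kn]) else M,
         C + nums[t] - nums[t - kn],
         (Dd.insert nums[t] (Dd.getD nums[t] 0 + 1)).insert nums[t - kn]
           ((Dd.insert nums[t] (Dd.getD nums[t] 0 + 1)).getD nums[t - kn] 0 - 1),
         (if ((Dd.insert nums[t] (Dd.getD nums[t] 0 + 1)).insert nums[t - kn]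
                ((Dd.insert nums[t] (Dd.getD nums[t] 0 + 1)).getD nums[t - kn] 0 - 1)).getD nums[t - kn] 0 = 0
            then (if (Dd.insert nums[t] (Dd.getD nums[t] 0 + 1)).getD nums[t] 0 = 1 then d + 1 else d) - 1
            else (if (Dd.insert nums[t] (Dd.getD nums[t] 0 + 1)).getD nums[t] 0 = 1 then d + 1 else d))) := by
      simp only [bStep, if_pos hkr, hy]
    have hD2 : ∀ v, ((Dd.insert nums[t] (Dd.getD nums[t] 0 + 1)).insert nums[t - kn]
        ((Dd.insert nums[t] (Dd.getD nums[t] 0 + 1)).getD nums[t - kn] 0 - 1)).getD v 0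
        = (((winX nums kn (t + 1)).count v : Nat) : Int) := by
      intro v
      rw [PySem.Dict.getD_insert]
      by_cases hv : v = nums[t - kn]
      · subst hv
        rw [if_pos rfl, hD1 _, hu]
        simp [List.count_cons_self]
      · rw [if_neg hv, hD1 v, hu]
        simp [List.count_cons]
        exact fun hh => hv hh.symm
    have hsum : (winX nums kn t).sum + nums[t] = nums[t - kn] + (winX nums kn (t + 1)).sum := by
      have := congrArg List.sum hu
      simpa [List.sum_append] using this
    have hd2 : (if ((Dd.insert nums[t] (Dd.getD nums[t] 0 + 1)).insert nums[t - kn]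
            ((Dd.insert nums[t] (Dd.getD nums[t] 0 + 1)).getD nums[t - kn] 0 - 1)).getD nums[t - kn] 0 = 0
          then (if (Dd.insert nums[t] (Dd.getD nums[t] 0 + 1)).getD nums[t] 0 = 1 then d + 1 else d) - 1
          else (if (Dd.insert nums[t] (Dd.getD nums[t] 0 + 1)).getD nums[t] 0 = 1 then d + 1 else d))
        = (((winX nums kn (t + 1)).toFinset.card : Nat) : Int) := by
      rw [hD2 nums[t - kn], hd1]
      have hcard : (winX nums kn t ++ [nums[t]]).toFinset.card
          = (winX nums kn (t + 1)).toFinset.card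
            + (if nums[t - kn] ∈ winX nums kn (t + 1) then 0 else 1) := by
        rw [hu, card_cons]
      by_cases hym : nums[t - kn] ∈ winX nums kn (t + 1)
      · have hcnt : 0 < (winX nums kn (t + 1)).count nums[t - kn] := List.count_pos_iff.2 hym
        rw [if_neg (by push_cast; omega), hcard, if_pos hym]
        push_cast; ring
      · have hcnt : (winX nums kn (t + 1)).count nums[t - kn] = 0 := List.count_eq_zero.2 hym
        rw [if_pos (by rw [hcnt]; rfl), hcard, if_neg hym]
        push_cast; ring
    rw [hbs]
    refine ⟨?_, ?_, ?_, ?_⟩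
    · simp only
      exact maxsum_update nums kn t hkn M (C + nums[t] - nums[t - kn]) _ hM
        (by rw [hC]; omega) hd2
    · simp only
      rw [hC]; omega
    · intro v
      simp only
      exact hD2 v
    · simp only
      exact hd2
  · -- no-removal case
    have hkr : ¬ ((kn : Int)) ≤ (t : Int) := by omega
    have hW' : winX nums kn (t + 1) = winX nums kn t ++ [nums[t]] := by
      unfold winX
      rw [show t - kn = 0 from by omega, show t + 1 - kn = 0 from by omega,
        List.drop_zero, List.drop_zero, List.take_add_one, List.getElem?_eq_getElem ht]
      rfl
    have hbs : bStep nums (kn : Int) (M, C, Dd, d) ((t : Int), nums[t]) =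
        (if (kn : Int) - 1 ≤ (t : Int) ∧
            (if (Dd.insert nums[t] (Dd.getD nums[t] 0 + 1)).getD nums[t] 0 = 1 then d + 1 else d) = (kn : Int)
          then max M (C + nums[t]) else M,
         C + nums[t],
         Dd.insert nums[t] (Dd.getD nums[t] 0 + 1),
         (if (Dd.insert nums[t] (Dd.getD nums[t] 0 + 1)).getD nums[t] 0 = 1 then d + 1 else d)) := by
      simp only [bStep, if_neg hkr]
    rw [hbs]
    refine ⟨?_, ?_, ?_, ?_⟩
    · simp only
      exact maxsum_update nums kn t hkn M (C + nums[t]) _ hM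
        (by rw [hW', List.sum_append, hC]; simp) (by rw [hd1, hW'])
    · simp only
      rw [hW', List.sum_append, hC]; simp
    · intro v
      simp only
      rw [hD1 v, hW']
    · simp only
      rw [hd1, hW']

theorem foldl_max_zero (l : List Int) (a : Int) (ha : 0 ≤ a) :
    l.foldl (fun m (_ : Int) => max m 0) a = a := by
  induction l generalizing a with
  | nil => rfl
  | cons x t ih => simpa [max_eq_left ha] using ih a ha

theorem a_nonposX (nums : List Int) (k : Int) (hk : k ≤ 0) : max_sum_k_unique nums k = 0 := by
  unfold max_sum_k_unique
  rcases lt_or_eq_of_le hk with hlt | heq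
  · rw [PySem.List.foldl_congr_mem (g := fun acc _ => acc), PySem.List.foldl_ignore]
    intro acc i _
    simp only
    rw [if_neg]
    intro h
    have : (0:Int) ≤ ((PySem.Set.ofList (PySem.List.slice nums (some i) (some (i + k)))).length : Int) := by positivity
    omega
  · subst heq
    rw [PySem.List.foldl_congr_mem (g := fun m (_ : Int) => max m 0)]
    · exact foldl_max_zero _ 0 le_rfl
    · intro acc i hi
      have h0 : 0 ≤ i := (PySem.List.mem_pyRange_one.1 hi).1
      simp only [add_zero]
      rw [PySem.List.slice_toNat nums h0 h0]
      simp

theorem a_eq_aAccX (nums : List Int) (k : Int) (kn : Nat) (hk : k = (kn : Int)) (hkn : 1 ≤ kn) :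
    max_sum_k_unique nums k = aAccX nums k kn nums.length := by
  unfold max_sum_k_unique aAccX
  dsimp only
  by_cases hle : kn ≤ nums.length + 1
  · have hcast : ((nums.length : Int)) - k + 1 = ((nums.length + 1 - kn : Nat) : Int) := by
      subst hk; push_cast; omega
    rw [hcast, PySem.List.pyRange_one, List.foldl_map]
    simp only [Int.sub_zero, Int.toNat_natCast]
    apply PySem.List.foldl_congr_mem
    intro acc i hi
    have hiw : winX nums kn (i + kn) = (nums.drop i).take kn := by
      unfold winX
      rw [show i + kn - kn = i from by omega, List.drop_take,
        show i + kn - i = kn from by omega]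
    have harg : (0 : Int) + (i:Int) + k = ((i:Int)) + ((kn:Int)) := by omega
    simp only [zero_add, hk] at *
    rw [show ((i:Int)) + ((kn:Int)) = (((i + kn : Nat)) : Int) by push_cast; ring]
    rw [PySem.List.slice_natCast]
    unfold aStepX
    rw [hiw, show i + kn - i = kn from by omega]
  · have hempty : PySem.List.pyRange 0 ((nums.length : Int) - k + 1) 1 = [] := by
      apply PySem.List.pyRange_one_eq_nil
      subst hk; push_cast; omega
    have hr : nums.length + 1 - kn = 0 := by omega
    rw [hempty, hr]
    rfl

theorem inv_foldX (nums : List Int) (k : Int) (kn : Nat) (hk : k = (kn : Int)) (hkn : 1 ≤ kn) :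
    BInv nums k kn nums.length
      ((PySem.List.enumerate nums 0).foldl (bStep nums k) (0, 0, PySem.Dict.empty, 0)) := by
  have key : ∀ t, t ≤ nums.length →
      BInv nums k kn t
        ((PySem.List.enumerate (nums.take t) 0).foldl (bStep nums k) (0, 0, PySem.Dict.empty, 0)) := by
    intro t
    induction t with
    | zero =>
      intro _
      refine ⟨?_, ?_, ?_, ?_⟩ <;>
        simp [winX, aAccX, PySem.Dict.getD_empty, Nat.sub_eq_zero_of_le hkn]
    | succ t ih =>
      intro hlt
      have ht : t < nums.length := by omega
      have hts : nums.take (t + 1) = nums.take t ++ [nums[t]] := by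
        rw [List.take_add_one, List.getElem?_eq_getElem ht]
        rfl
      rw [hts, PySem.List.enumerate_append, List.foldl_append]
      have hlen : (0 : Int) + (nums.take t).length = (t : Int) := by
        simp [List.length_take, Nat.min_eq_left (le_of_lt ht)]
      rw [hlen]
      have : PySem.List.enumerate [nums[t]] (t : Int) = [((t : Int), nums[t])] := by
        simp [PySem.List.enumerate_cons, PySem.List.enumerate_nil]
      rw [this, List.foldl_cons, List.foldl_nil]
      exact inv_stepX nums k kn t hk hkn ht _ (ih (le_of_lt hlt))
  have := key nums.length le_rfl
  rwa [List.take_length] at this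


-- ===== VERDICT (by name: the statement is the Claim_ definition above) =====
theorem max_sum_k_unique_spec : Claim_equal_max_sum_k_unique := by
  intro nums k _
  unfold Spec_max_sum_k_unique max_sum_k_unique_alt
  by_cases hk : k ≤ 0
  · simp [hk, a_nonposX nums k hk]
  · have hkeq : k = ((k.toNat : Nat) : Int) := by omega
    have hkn : 1 ≤ k.toNat := by omega
    rw [if_neg hk, a_eq_aAccX nums k k.toNat hkeq hkn]
    exact ((inv_foldX nums k k.toNat hkeq hkn).1).symm
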